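-- pv_equiv track=rewrite | github.com/crifan/crifanLibPython | python3/crifanLib/crifanDict.py | insertKeyValueAfterDictKey
-- ===== SOURCE A (Python) =====
-- def insertKeyValueAfterDictKey(curDict, afterKey, newKey, newValue):
--     """Insert new key and new value after specific key
--
--     Args:
--         afterKey (str): name of after the key in dict
--         newKey (str): new key to insert
--         newValue (Any?): new value to insert
--     Returns:
--     Raises:
--     """
--     # keyList = curDict.keys()
--     keyList = list(curDict.keys())
--     keyMaxNum = len(keyList)
--     keyMaxIdx = keyMaxNum - 1
--     # valuesList = curDict.values()
--     valuesList = list(curDict.values())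
--     afterKeyIndex = keyList.index(afterKey) # 6
--     if afterKeyIndex < keyMaxIdx:
--         toInsertIndex = afterKeyIndex + 1
--         keyList.insert(toInsertIndex, newKey)
--         valuesList.insert(toInsertIndex, newValue)
--     else:
--         keyList.append(newKey)
--         valuesList.append(newValue)
--     updatedDict = {}
--     for keyIdx, eachKey in enumerate(keyList):
--         eachValue = valuesList[keyIdx]
--         updatedDict[eachKey] = eachValue
--     return updatedDict
-- ===== SOURCE B (Python) =====
-- def insertKeyValueAfterDictKey(curDict, afterKey, newKey, newValue):
--     """Insert new key/value right after afterKey, single pass."""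
--     if afterKey not in curDict:
--         raise ValueError("%r is not in the dict" % (afterKey,))
--     result = {}
--     for k, v in curDict.items():
--         result[k] = v
--         if k == afterKey:
--             result[newKey] = newValue
--     return result
-- ===== Notes on version B (the rewrite author's own statement) =====
-- stated objective: simpler
-- what changed: B replaces A's parallel key/value lists, .index lookup and splice-and-rebuild with a single pass over the dict items that emits the new pair right after the matching key.
import Mathlib
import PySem

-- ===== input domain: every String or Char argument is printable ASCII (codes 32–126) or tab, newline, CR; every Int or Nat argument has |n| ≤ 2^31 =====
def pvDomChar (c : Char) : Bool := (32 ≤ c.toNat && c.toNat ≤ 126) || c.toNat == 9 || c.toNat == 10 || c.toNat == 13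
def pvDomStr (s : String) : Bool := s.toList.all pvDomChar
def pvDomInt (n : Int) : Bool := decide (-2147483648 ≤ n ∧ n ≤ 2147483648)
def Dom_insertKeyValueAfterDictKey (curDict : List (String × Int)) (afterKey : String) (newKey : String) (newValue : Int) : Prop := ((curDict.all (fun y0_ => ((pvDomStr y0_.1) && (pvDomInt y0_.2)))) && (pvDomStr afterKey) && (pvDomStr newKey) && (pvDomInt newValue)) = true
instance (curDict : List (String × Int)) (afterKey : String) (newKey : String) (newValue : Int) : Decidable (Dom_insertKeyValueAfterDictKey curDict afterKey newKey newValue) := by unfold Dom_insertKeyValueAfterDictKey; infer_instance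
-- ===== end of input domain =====

-- B builds the result in ONE pass over the items, emitting the new pair right after the
-- matching key, instead of A's parallel key/value lists with .index and a splice (objective: simpler).

-- ===== PORT A =====
def insertKeyValueAfterDictKey (curDict : List (String × Int)) (afterKey : String) (newKey : String) (newValue : Int) : List (String × Int) :=
  let keyList := curDict.map Prod.fst
  let keyMaxNum : Int := (keyList.length : Int)
  let keyMaxIdx : Int := keyMaxNum - 1
  let valuesList := curDict.map Prod.snd
  match PySem.List.index? keyList afterKey with
  | none => []  -- Python raises ValueError here; excluded by Pre_
  | some afterKeyIndex =>
    let kv :=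
      if (afterKeyIndex : Int) < keyMaxIdx then
        let toInsertIndex : Int := (afterKeyIndex : Int) + 1
        (PySem.List.insert keyList toInsertIndex newKey,
         PySem.List.insert valuesList toInsertIndex newValue)
      else
        (keyList ++ [newKey], valuesList ++ [newValue])
    let updatedDict : PySem.Dict String Int :=
      (PySem.List.enumerate kv.1).foldl
        (fun d p => d.insert p.2 (PySem.List.pyGetD kv.2 p.1 0)) PySem.Dict.empty
    updatedDict.items

-- ===== PORT B =====
def insertKeyValueAfterDictKey_alt (curDict : List (String × Int)) (afterKey : String) (newKey : String) (newValue : Int) : List (String × Int) :=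
  if (curDict.map Prod.fst).contains afterKey then
    (curDict.foldl
      (fun d kv =>
        let d' := d.insert kv.1 kv.2
        if kv.1 == afterKey then d'.insert newKey newValue else d')
      PySem.Dict.empty).items
  else []  -- Python raises ValueError here; excluded by Pre_

-- ===== PRECONDITION & SPEC =====
-- Pre_ requires (a) afterKey to be a key of curDict — otherwise the Python A raises ValueError —
-- and (b) the association list to have distinct keys, since it encodes a Python dict and a dict
-- cannot contain duplicate keys (duplicate-key lists do not correspond to any Python input).
def Pre_insertKeyValueAfterDictKey (curDict : List (String × Int)) (afterKey : String) (newKey : String) (newValue : Int) : Prop :=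
  (curDict.map Prod.fst).Nodup ∧ afterKey ∈ curDict.map Prod.fst
instance (curDict : List (String × Int)) (afterKey : String) (newKey : String) (newValue : Int) : Decidable (Pre_insertKeyValueAfterDictKey curDict afterKey newKey newValue) := by unfold Pre_insertKeyValueAfterDictKey; infer_instance

def pvWitness_insertKeyValueAfterDictKey : (List (String × Int)) × String × String × Int :=
  ([("a", 1), ("b", 2)], "a", "c", 5)

def Spec_insertKeyValueAfterDictKey (curDict : List (String × Int)) (afterKey : String) (newKey : String) (newValue : Int) (out : List (String × Int)) : Prop := out = insertKeyValueAfterDictKey_alt curDict afterKey newKey newValue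
instance (curDict : List (String × Int)) (afterKey : String) (newKey : String) (newValue : Int) (out : List (String × Int)) : Decidable (Spec_insertKeyValueAfterDictKey curDict afterKey newKey newValue out) := by unfold Spec_insertKeyValueAfterDictKey; infer_instance

-- ===== CLAIM (what is proved, stated in full; the proofs are below) =====
def Claim_equal_insertKeyValueAfterDictKey : Prop := ∀ (curDict : List (String × Int)) (afterKey : String) (newKey : String) (newValue : Int), Dom_insertKeyValueAfterDictKey curDict afterKey newKey newValue → Pre_insertKeyValueAfterDictKey curDict afterKey newKey newValue → Spec_insertKeyValueAfterDictKey curDict afterKey newKey newValue (insertKeyValueAfterDictKey curDict afterKey newKey newValue)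

-- ===== LEMMAS AND PROOFS =====

lemma pv_insert_after {α : Type} (xs : List α) (a v : α) (ys : List α) :
    PySem.List.insert (xs ++ a :: ys) ((xs.length : Int) + 1) v = xs ++ a :: v :: ys := by
  have h : ((xs.length : Int) + 1) = ((xs.length + 1 : Nat) : Int) := by push_cast; ring
  rw [h, PySem.List.insert_natCast _ _ _ (by simp)]
  simp [List.take_append, List.drop_append, List.take_of_length_le (Nat.le_succ _),
    List.drop_eq_nil_of_le (Nat.le_succ _)]

theorem pv_enum_fold (ks : List String) (vs0 vs : List Int) (d : PySem.Dict String Int)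
    (h : ks.length = vs.length) :
    (PySem.List.enumerate ks (vs0.length : Int)).foldl
        (fun d p => d.insert p.2 (PySem.List.pyGetD (vs0 ++ vs) p.1 0)) d
      = (ks.zip vs).foldl (fun d p => d.insert p.1 p.2) d := by
  induction ks generalizing vs0 vs d with
  | nil => simp [PySem.List.enumerate_nil]
  | cons k ks ih =>
    cases vs with
    | nil => simp at h
    | cons v vs =>
      rw [PySem.List.enumerate_cons]
      simp only [List.foldl_cons, List.zip_cons_cons]
      have hget : PySem.List.pyGetD (vs0 ++ v :: vs) ((vs0.length : Int)) 0 = v := by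
        rw [PySem.List.pyGetD_natCast]
        simp [List.getD]
      rw [hget]
      have hlen : ((vs0.length : Int) + 1) = (((vs0 ++ [v]).length : Nat) : Int) := by
        push_cast [List.length_append]; simp
      rw [hlen]
      have := ih (vs0 ++ [v]) vs (d.insert k v) (by simpa using h)
      simpa using this

theorem pv_b_fold (pre suf : List (String × Int)) (afterKey newKey : String) (w newValue : Int)
    (d : PySem.Dict String Int)
    (hpre : afterKey ∉ pre.map Prod.fst) (hsuf : afterKey ∉ suf.map Prod.fst) :
    (pre ++ (afterKey, w) :: suf).foldl
        (fun d kv =>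
          let d' := d.insert kv.1 kv.2
          if kv.1 == afterKey then d'.insert newKey newValue else d') d
      = (pre ++ (afterKey, w) :: (newKey, newValue) :: suf).foldl
          (fun d p => d.insert p.1 p.2) d := by
  rw [List.foldl_append, List.foldl_append, List.foldl_cons, List.foldl_cons, List.foldl_cons]
  have hp : pre.foldl (fun d kv =>
          let d' := d.insert kv.1 kv.2
          if kv.1 == afterKey then d'.insert newKey newValue else d') d
      = pre.foldl (fun d p => d.insert p.1 p.2) d := by
    apply PySem.List.foldl_congr_mem
    intro acc x hx
    have : x.1 ≠ afterKey := fun he => hpre (he ▸ List.mem_map_of_mem hx)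
    simp [this]
  rw [hp]
  simp only [beq_self_eq_true, if_true]
  apply PySem.List.foldl_congr_mem
  intro acc x hx
  have : x.1 ≠ afterKey := fun he => hsuf (he ▸ List.mem_map_of_mem hx)
  simp [this]

theorem pv_a_tail (pre suf : List (String × Int)) (k newKey : String) (w newValue : Int) :
    (List.foldl
        (fun d p => d.insert p.2
          (PySem.List.pyGetD (pre.map Prod.snd ++ w :: newValue :: suf.map Prod.snd) p.1 0))
        PySem.Dict.empty
        (PySem.List.enumerate (pre.map Prod.fst ++ k :: newKey :: suf.map Prod.fst)))
      = List.foldl (fun d p => d.insert p.1 p.2) PySem.Dict.empty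
          (pre ++ (k, w) :: (newKey, newValue) :: suf) := by
  have hz : (pre.map Prod.fst ++ k :: newKey :: suf.map Prod.fst).zip
        (pre.map Prod.snd ++ w :: newValue :: suf.map Prod.snd)
      = pre ++ (k, w) :: (newKey, newValue) :: suf := by
    rw [List.zip_append (by simp), List.zip_cons_cons, List.zip_cons_cons, List.zip_map']
    simp [List.zip_map']
  have := pv_enum_fold (pre.map Prod.fst ++ k :: newKey :: suf.map Prod.fst) []
      (pre.map Prod.snd ++ w :: newValue :: suf.map Prod.snd) PySem.Dict.empty (by simp)
  rw [hz] at this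
  simpa using this

theorem pv_main (curDict : List (String × Int)) (afterKey newKey : String) (newValue : Int)
    (hnd : (curDict.map Prod.fst).Nodup) (hmem : afterKey ∈ curDict.map Prod.fst) :
    insertKeyValueAfterDictKey curDict afterKey newKey newValue
      = insertKeyValueAfterDictKey_alt curDict afterKey newKey newValue := by
  obtain ⟨p, hp, hfst⟩ := List.mem_map.mp hmem
  obtain ⟨pre, suf, hsplit⟩ := List.append_of_mem hp
  obtain ⟨k, w⟩ := p
  cases hfst
  subst hsplit
  rw [List.map_append, List.map_cons] at hnd
  have hpre' : k ∉ pre.map Prod.fst := by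
    intro hk
    exact (List.disjoint_of_nodup_append hnd) hk (List.mem_cons_self)
  have hsuf' : k ∉ suf.map Prod.fst := by
    have := (List.nodup_append.mp hnd).2.1
    simpa using (List.nodup_cons.mp this).1
  have hidx : PySem.List.index? ((pre ++ (k,w)::suf).map Prod.fst) k
      = some (pre.map Prod.fst).length :=
    (PySem.List.index?_eq_some_iff _ _ _).mpr ⟨pre.map Prod.fst, suf.map Prod.fst, by simp, rfl, hpre'⟩
  have hc : ((pre ++ (k,w)::suf).map Prod.fst).contains k = true := by simp
  simp only [insertKeyValueAfterDictKey, insertKeyValueAfterDictKey_alt, hidx, hc, if_true]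
  rw [pv_b_fold pre suf k newKey w newValue _ hpre' hsuf']
  rcases suf with _ | ⟨s, ss⟩
  · rw [if_neg (by simp)]
    simpa using congrArg PySem.Dict.items (pv_a_tail pre [] k newKey w newValue)
  · rw [if_pos (by simp [List.length_append]; omega)]
    have h1 : ((pre ++ (k, w) :: s :: ss).map Prod.fst) = pre.map Prod.fst ++ k :: (s :: ss).map Prod.fst := by simp
    have h2 : ((pre ++ (k, w) :: s :: ss).map Prod.snd) = pre.map Prod.snd ++ w :: (s :: ss).map Prod.snd := by simp
    have hlen2 : ((pre.map Prod.fst).length : Int) = ((pre.map Prod.snd).length : Int) := by simp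
    rw [h1, h2, pv_insert_after, hlen2, pv_insert_after]
    simpa using congrArg PySem.Dict.items (pv_a_tail pre (s :: ss) k newKey w newValue)

-- ===== VERDICT (by name: the statement is the Claim_ definition above) =====
theorem insertKeyValueAfterDictKey_spec : Claim_equal_insertKeyValueAfterDictKey := by
  intro curDict afterKey newKey newValue _ hpre
  unfold Spec_insertKeyValueAfterDictKey
  exact pv_main curDict afterKey newKey newValue hpre.1 hpre.2
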